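-- pv_equiv track=rewrite | github.com/imckechn/Super-N-Queens-and-Tree-Search-Algos | superQueens.py | isInEndState
-- ===== SOURCE A (Python) =====
-- def isInEndState(board):
--     reversedArr = []
--
--     for i in range(len(board)): #Rows
--         reverseRow = board[i][::-1]
--         reversedArr.append(reverseRow)
--
--     for i in range(len(board)):
--         for j in range(len(board)):
--
--             if i == j and reversedArr[i][j] != "Q":
--                 return False
--     return True
-- ===== SOURCE B (Python) =====
-- def isInEndState(board):
--     for i, row in enumerate(board):
--         if row[-1 - i] != "Q":
--             return False
--     return True
-- ===== Notes on version B (the rewrite author's own statement) =====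
-- stated objective: simpler
-- what changed: B makes one pass over the rows checking each anti-diagonal cell board[i][-1-i] directly, instead of first building a reversed copy of every row and then scanning the full n×n index grid for the diagonal (measured only ~1.3x faster on the generated inputs, so claimed as simpler, not faster).
import Mathlib
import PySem

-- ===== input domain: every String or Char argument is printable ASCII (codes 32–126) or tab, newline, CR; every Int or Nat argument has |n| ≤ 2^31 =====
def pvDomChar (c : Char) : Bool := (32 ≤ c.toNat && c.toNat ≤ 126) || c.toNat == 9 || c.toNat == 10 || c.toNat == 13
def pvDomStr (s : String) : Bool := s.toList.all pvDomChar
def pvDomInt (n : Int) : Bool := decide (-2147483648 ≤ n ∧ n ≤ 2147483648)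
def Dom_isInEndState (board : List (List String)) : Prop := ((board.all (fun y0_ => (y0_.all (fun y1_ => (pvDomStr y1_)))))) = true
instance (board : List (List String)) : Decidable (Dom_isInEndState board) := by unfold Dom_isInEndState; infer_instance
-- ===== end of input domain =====

-- B replaces A's reversed copy of every row plus a full n×n index scan by a single
-- pass reading each anti-diagonal cell board[i][-1-i] directly.

-- ===== PORT A =====
def isInEndState (board : List (List String)) : Bool :=
  -- first loop: reversedArr.append(board[i][::-1])
  let reversedArr : List (List String) :=
    (List.range board.length).foldl
      (fun acc i => acc ++ [(PySem.List.slice? (board.getD i []) none none (-1)).getD []]) []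
  -- nested loop with early 'return False' encoded as List.all
  (List.range board.length).all (fun i =>
    (List.range board.length).all (fun j =>
      !(decide (i = j) && decide ((reversedArr.getD i []).getD j "" ≠ "Q"))))

-- ===== PORT B =====
-- loop 'for i, row in enumerate(board): if row[-1-i] != "Q": return False'
def pvGoB : List (List String) → Nat → Bool
  | [], _ => true
  | row :: rest, i =>
    if PySem.List.pyGet? row (-1 - (i : Int)) ≠ some "Q" then false else pvGoB rest (i + 1)

def isInEndState_alt (board : List (List String)) : Bool := pvGoB board 0

-- ===== PRECONDITION & SPEC =====
-- Pre_ excludes exactly the boards on which Python A raises IndexError: some row i has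
-- length ≤ i and no earlier row already fails the anti-diagonal check (which would have
-- returned False first).  Python B raises on exactly the same boards.
def Pre_isInEndState (board : List (List String)) : Prop :=
  ∀ i, i < board.length → (board.getD i []).length ≤ i →
    ∃ k, k < i ∧ k < (board.getD k []).length ∧
      (board.getD k []).getD ((board.getD k []).length - 1 - k) "" ≠ "Q"

instance (board : List (List String)) : Decidable (Pre_isInEndState board) := by
  unfold Pre_isInEndState; infer_instance

def pvWitness_isInEndState : List (List String) := [["Q", "."], [".", "Q"]]

def Spec_isInEndState (board : List (List String)) (out : Bool) : Prop := out = isInEndState_alt board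
instance (board : List (List String)) (out : Bool) : Decidable (Spec_isInEndState board out) := by unfold Spec_isInEndState; infer_instance

-- ===== CLAIM (what is proved, stated in full; the proofs are below) =====
def Claim_equal_isInEndState : Prop := ∀ (board : List (List String)), Dom_isInEndState board → Pre_isInEndState board → Spec_isInEndState board (isInEndState board)

-- ===== LEMMAS AND PROOFS =====

theorem pvFoldlRangeAppend {β : Type} (g : Nat → β) (n : Nat) (acc : List β) :
    (List.range n).foldl (fun a i => a ++ [g i]) acc = acc ++ (List.range n).map g := by
  induction n generalizing acc with
  | zero => simp
  | succ n ih => simp [List.range_succ, List.foldl_append, ih]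

theorem pvRevArr_getD (board : List (List String)) (i : Nat) (h : i < board.length) :
    (((List.range board.length).map
        (fun i => (PySem.List.slice? (board.getD i []) none none (-1)).getD [])).getD i [])
      = (board.getD i []).reverse := by
  rw [List.getD_eq_getElem?_getD, List.getElem?_map, List.getElem?_range h]
  simp [PySem.List.slice?_none_none_neg_one]

theorem pvA_true_iff (board : List (List String)) :
    isInEndState board = true ↔
      ∀ i < board.length, ((board.getD i []).reverse).getD i "" = "Q" := by
  unfold isInEndState
  rw [pvFoldlRangeAppend]
  simp only [List.all_eq_true, List.mem_range, Bool.not_eq_eq_eq_not, Bool.not_true,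
    Bool.and_eq_false_iff, decide_eq_false_iff_not, List.nil_append]
  constructor
  · intro h i hi
    have := h i hi i hi
    rcases this with h' | h'
    · exact absurd rfl h'
    · rw [pvRevArr_getD board i hi] at h'
      exact not_not.mp h'
  · intro h i hi j hj
    by_cases hij : i = j
    · right; subst hij; rw [pvRevArr_getD board i hi]; exact not_not.mpr (h i hi)
    · left; exact hij

theorem pvB_true_iff (l : List (List String)) (i : Nat) :
    pvGoB l i = true ↔
      ∀ j < l.length, PySem.List.pyGet? (l.getD j []) (-1 - ((i + j : Nat) : Int)) = some "Q" := by
  induction l generalizing i with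
  | nil => simp [pvGoB]
  | cons row rest ih =>
    simp only [pvGoB]
    by_cases h : PySem.List.pyGet? row (-1 - (i : Int)) = some "Q"
    · simp only [h, ne_eq, not_true_eq_false, if_false, ih (i + 1)]
      constructor
      · intro hr j hj
        cases j with
        | zero => simpa using h
        | succ j =>
          have := hr j (by simpa using hj)
          simpa [Nat.add_comm, Nat.add_left_comm, Nat.add_assoc] using this
      · intro hall j hj
        have := hall (j + 1) (by simpa using hj)
        simpa [Nat.add_comm, Nat.add_left_comm, Nat.add_assoc] using this
    · simp only [h, ne_eq, not_false_eq_true, if_true]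
      constructor
      · intro hF; exact absurd hF (by simp)
      · intro hall
        have := hall 0 (by simp)
        simp at this
        exact absurd this h
  
theorem pvCell_iff (row : List String) (i : Nat) :
    ((row.reverse).getD i "" = "Q") ↔ (PySem.List.pyGet? row (-1 - (i : Int)) = some "Q") := by
  by_cases h : i < row.length
  · have hlen : i < row.reverse.length := by simpa using h
    rw [List.getD_eq_getElem _ _ hlen]
    have hneg : (-1 - (i : Int)) = -((i + 1 : Nat) : Int) := by push_cast; ring
    rw [hneg, PySem.List.pyGet?_neg_natCast row (i + 1) (by omega) (by omega)]
    rw [List.getElem_reverse]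
    rw [List.getElem?_eq_getElem (by omega)]
    constructor
    · intro he; exact congrArg some (by simpa [Nat.sub_sub, Nat.add_comm] using he)
    · intro he; have := Option.some.inj he; simpa [Nat.sub_sub, Nat.add_comm] using this
  · constructor
    · intro he
      exfalso
      rw [List.getD_eq_getElem?_getD, List.getElem?_eq_none (by simpa using h)] at he
      simp at he
    · intro he
      exfalso
      have hnone : PySem.List.pyGet? row (-1 - (i : Int)) = none := by
        rw [PySem.List.pyGet?_eq_none_iff]
        simp [PySem.Raise.InRange]
        omega
      rw [hnone] at he
      simp at he

theorem pvPorts_eq (board : List (List String)) :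
    isInEndState board = isInEndState_alt board := by
  have hA := pvA_true_iff board
  have hB := pvB_true_iff board 0
  have : isInEndState board = true ↔ isInEndState_alt board = true := by
    rw [hA]
    unfold isInEndState_alt
    rw [hB]
    constructor
    · intro h j hj
      have := (pvCell_iff (board.getD j []) j).mp (h j hj)
      simpa using this
    · intro h i hi
      apply (pvCell_iff (board.getD i []) i).mpr
      have := h i hi
      simpa using this
  cases hb : isInEndState board <;> cases hb' : isInEndState_alt board <;>
    simp_all

-- ===== VERDICT (by name: the statement is the Claim_ definition above) =====
theorem isInEndState_spec : Claim_equal_isInEndState := by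
  intro board _ _
  unfold Spec_isInEndState
  exact pvPorts_eq board
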